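-- pv_equiv track=rewrite | github.com/Andrem19/T7_ALGO | test_22.py | _mask_to_values
-- ===== SOURCE A (Python) =====
-- from typing import Any, Dict, List, Optional, Sequence, Tuple, Iterable
--
-- def _mask_to_values(mask: int, uniques: Sequence[Any]) -> Tuple[Any, ...]:
--     """
--     Быстро достаём значения по установленным битам маски.
--     Идём только по включённым битам (а не по всем uniques).
--     """
--     vals: List[Any] = []
--     m = int(mask)
--     while m:
--         lsb = m & -m
--         bit = int(lsb.bit_length() - 1)
--         vals.append(uniques[bit])
--         m ^= lsb
--     return tuple(vals)
-- ===== SOURCE B (Python) =====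
-- from typing import Any, Sequence, Tuple, List
--
-- def _mask_to_values(mask: int, uniques: Sequence[Any]) -> Tuple[Any, ...]:
--     # Scan every candidate bit position instead of peeling lowest set bits.
--     vals: List[Any] = []
--     for i in range(mask.bit_length()):
--         if (mask >> i) & 1:
--             vals.append(uniques[i])
--     return tuple(vals)
-- ===== Notes on version B (the rewrite author's own statement) =====
-- stated objective: alternative
-- what changed: B replaces A's lowest-set-bit peeling loop (m & -m, bit_length, xor-clear) with a single scan over all bit positions 0..mask.bit_length()-1 testing (mask >> i) & 1.
import Mathlib
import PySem

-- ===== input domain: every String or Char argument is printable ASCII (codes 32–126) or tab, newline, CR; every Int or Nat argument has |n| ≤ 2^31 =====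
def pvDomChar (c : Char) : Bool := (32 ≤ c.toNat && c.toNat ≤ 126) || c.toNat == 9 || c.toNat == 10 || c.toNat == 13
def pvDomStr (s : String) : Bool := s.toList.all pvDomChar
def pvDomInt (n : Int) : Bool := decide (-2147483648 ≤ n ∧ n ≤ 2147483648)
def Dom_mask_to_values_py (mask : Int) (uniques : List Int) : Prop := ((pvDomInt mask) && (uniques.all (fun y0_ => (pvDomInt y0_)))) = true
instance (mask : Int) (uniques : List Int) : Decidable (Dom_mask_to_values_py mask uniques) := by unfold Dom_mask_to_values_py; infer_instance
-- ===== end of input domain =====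

-- B replaces A's lowest-set-bit peeling loop (m & -m, xor-clear) with a plain scan of all
-- bit positions 0..bit_length-1; equal return values proved on Pre_ (mask ≥ 0 with every
-- set bit indexing into uniques — exactly the inputs where Python A returns normally).


-- shared port of Python's built-in int.bit_length (bit length of |n|)
def pyBitLength (n : Int) : Int :=
  if n = 0 then 0 else ((Nat.log2 n.natAbs : Int) + 1)

-- ===== PORT A =====
-- while m: lsb = m & -m; bit = lsb.bit_length() - 1; vals.append(uniques[bit]); m ^= lsb
-- (Int.land / Int.xor are Python's & / ^ on ints, two's complement.)
-- Fuel (mask.toNat + 1) only totalizes the loop: it exceeds the popcount-many iterations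
-- on every mask ≥ 0; Python raises IndexError on an out-of-range bit (excluded by Pre_),
-- pyGet? reads the same element where Python returns.
def goA : Nat → Int → List Int → List Int → List Int
  | 0, _, _, vals => vals
  | fuel+1, m, uniques, vals =>
    if m = 0 then vals
    else
      let lsb := Int.land m (-m)
      let bit := pyBitLength lsb - 1
      goA fuel (Int.xor m lsb) uniques (vals ++ [(PySem.List.pyGet? uniques bit).getD 0])

def mask_to_values_py (mask : Int) (uniques : List Int) : List Int :=
  goA (mask.toNat + 1) mask uniques []

-- ===== PORT B =====
-- for i in range(mask.bit_length()): if (mask >> i) & 1: vals.append(uniques[i])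
def mask_to_values_py_alt (mask : Int) (uniques : List Int) : List Int :=
  (List.range (pyBitLength mask).toNat).foldl
    (fun (vals : List Int) (i : Nat) =>
      if Int.land (mask >>> (i : Int)) 1 ≠ 0 then
        vals ++ [(PySem.List.pyGet? uniques (i : Int)).getD 0]
      else vals) []

-- ===== PRECONDITION & SPEC =====
-- exactly the inputs where Python A returns: a negative mask loops forever,
-- and a set bit at position ≥ len(uniques) raises IndexError (in B as well)
def Pre_mask_to_values_py (mask : Int) (uniques : List Int) : Prop :=
  0 ≤ mask ∧ mask < 2 ^ uniques.length

instance (mask : Int) (uniques : List Int) : Decidable (Pre_mask_to_values_py mask uniques) := by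
  unfold Pre_mask_to_values_py; infer_instance

def pvWitness_mask_to_values_py : Int × List Int := (5, [10, 20, 30])

def Spec_mask_to_values_py (mask : Int) (uniques : List Int) (out : List Int) : Prop := out = mask_to_values_py_alt mask uniques
instance (mask : Int) (uniques : List Int) (out : List Int) : Decidable (Spec_mask_to_values_py mask uniques out) := by unfold Spec_mask_to_values_py; infer_instance

-- ===== CLAIM (what is proved, stated in full; the proofs are below) =====
def Claim_equal_mask_to_values_py : Prop := ∀ (mask : Int) (uniques : List Int), Dom_mask_to_values_py mask uniques → Pre_mask_to_values_py mask uniques → Spec_mask_to_values_py mask uniques (mask_to_values_py mask uniques)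

-- ===== LEMMAS AND PROOFS =====

-- trailing zeros of a positive Nat
def tz : Nat → Nat
  | 0 => 0
  | n+1 => if (n+1) % 2 = 1 then 0 else tz ((n+1)/2) + 1
decreasing_by omega

-- ascending list of set-bit positions
def bitsIdx : Nat → List Nat
  | 0 => []
  | n+1 => (if (n+1) % 2 = 1 then [0] else []) ++ (bitsIdx ((n+1)/2)).map (· + 1)
decreasing_by omega

-- Nat bit length as the port computes it
def blN (n : Nat) : Nat := if n = 0 then 0 else Nat.log2 n + 1

theorem tz_odd {n : Nat} (h : n % 2 = 1) : tz n = 0 := by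
  cases n with
  | zero => simp at h
  | succ m => simp [tz, h]

theorem tz_even {n : Nat} (h0 : n ≠ 0) (h : n % 2 = 0) : tz n = tz (n / 2) + 1 := by
  cases n with
  | zero => simp at h0
  | succ m => rw [tz]; simp [h]

theorem bitsIdx_pos {n : Nat} (h0 : n ≠ 0) :
    bitsIdx n = (if n % 2 = 1 then [0] else []) ++ (bitsIdx (n / 2)).map (· + 1) := by
  cases n with
  | zero => simp at h0
  | succ m => rw [bitsIdx]

theorem bitsIdx_two_mul (m : Nat) : bitsIdx (2 * m) = (bitsIdx m).map (· + 1) := by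
  rcases Nat.eq_zero_or_pos m with rfl | hm
  · simp [bitsIdx]
  · rw [bitsIdx_pos (by omega)]
    have h1 : 2 * m % 2 = 0 := Nat.mul_mod_right 2 m
    have h2 : 2 * m / 2 = m := by omega
    simp [h1, h2]

theorem blN_pos {n : Nat} (h0 : n ≠ 0) : blN n = blN (n / 2) + 1 := by
  unfold blN
  rcases Nat.lt_or_ge n 2 with h | h
  · interval_cases n
    · simp at h0
    · simp [Nat.log2_def]
  · rw [Nat.log2_def]
    have h2 : n / 2 ≠ 0 := by omega
    simp [h, h0, h2]

theorem ldiff_pred_odd {n : Nat} (h : n % 2 = 1) : Nat.ldiff n (n - 1) = 1 := by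
  apply Nat.eq_of_testBit_eq
  intro i
  rw [Nat.testBit_ldiff]
  cases i with
  | zero =>
      rw [Nat.testBit_zero, Nat.testBit_zero, Nat.testBit_zero]
      have h2 : (n - 1) % 2 = 0 := by omega
      simp [h, h2]
  | succ i =>
      rw [Nat.testBit_succ, Nat.testBit_succ, Nat.testBit_succ]
      have hd : (n - 1) / 2 = n / 2 := by omega
      have h12 : 1 / 2 = 0 := rfl
      rw [hd, h12]
      simp [Nat.zero_testBit]

theorem ldiff_pred_even (m : Nat) :
    Nat.ldiff (2 * m) (2 * m - 1) = 2 * Nat.ldiff m (m - 1) := by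
  apply Nat.eq_of_testBit_eq
  intro i
  rw [Nat.testBit_ldiff]
  cases i with
  | zero =>
      rw [Nat.testBit_zero, Nat.testBit_zero, Nat.testBit_zero]
      have e1 : 2 * m % 2 = 0 := Nat.mul_mod_right 2 m
      have e2 : 2 * Nat.ldiff m (m - 1) % 2 = 0 := Nat.mul_mod_right 2 _
      simp [e1, e2]
  | succ i =>
      rw [Nat.testBit_succ, Nat.testBit_succ, Nat.testBit_succ]
      have h1 : 2 * m / 2 = m := by omega
      have h2 : (2 * m - 1) / 2 = m - 1 := by omega
      have h3 : 2 * Nat.ldiff m (m - 1) / 2 = Nat.ldiff m (m - 1) := by omega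
      rw [h1, h2, h3, Nat.testBit_ldiff]

theorem ldiff_pred {n : Nat} (h0 : n ≠ 0) : Nat.ldiff n (n - 1) = 2 ^ tz n := by
  induction n using Nat.strong_induction_on with
  | _ n ih =>
    rcases Nat.even_or_odd n with he | ho
    · obtain ⟨m, rfl⟩ := he
      have hm2 : m + m = 2 * m := by omega
      have hm0 : m ≠ 0 := by omega
      have hq : 2 * m / 2 = m := by omega
      rw [hm2, ldiff_pred_even m, ih m (by omega) hm0,
        tz_even (n := 2 * m) (by omega) (Nat.mul_mod_right 2 m), hq, pow_succ]
      ring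
    · have h1 : n % 2 = 1 := Nat.odd_iff.mp ho
      rw [ldiff_pred_odd h1, tz_odd h1, pow_zero]

theorem xor_two_mul (a b : Nat) : (2 * a) ^^^ (2 * b) = 2 * (a ^^^ b) := by
  apply Nat.eq_of_testBit_eq
  intro i
  rw [Nat.testBit_xor]
  cases i with
  | zero =>
      rw [Nat.testBit_zero, Nat.testBit_zero, Nat.testBit_zero]
      have e1 : 2 * a % 2 = 0 := Nat.mul_mod_right 2 a
      have e2 : 2 * b % 2 = 0 := Nat.mul_mod_right 2 b
      have e3 : 2 * (a ^^^ b) % 2 = 0 := Nat.mul_mod_right 2 _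
      simp [e1, e2, e3]
  | succ i =>
      rw [Nat.testBit_succ, Nat.testBit_succ, Nat.testBit_succ]
      have h1 : 2 * a / 2 = a := by omega
      have h2 : 2 * b / 2 = b := by omega
      have h3 : 2 * (a ^^^ b) / 2 = a ^^^ b := by omega
      rw [h1, h2, h3, Nat.testBit_xor]

theorem xor_one_odd {n : Nat} (h : n % 2 = 1) : n ^^^ 1 = n - 1 := by
  apply Nat.eq_of_testBit_eq
  intro i
  rw [Nat.testBit_xor]
  cases i with
  | zero =>
      rw [Nat.testBit_zero, Nat.testBit_zero, Nat.testBit_zero]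
      have h2 : (n - 1) % 2 = 0 := by omega
      simp [h, h2]
  | succ i =>
      rw [Nat.testBit_succ, Nat.testBit_succ, Nat.testBit_succ]
      have hd : (n - 1) / 2 = n / 2 := by omega
      have h12 : 1 / 2 = 0 := rfl
      rw [hd, h12]
      simp [Nat.zero_testBit]

theorem xor_tz {n : Nat} (h0 : n ≠ 0) : n ^^^ 2 ^ tz n = n - 2 ^ tz n := by
  induction n using Nat.strong_induction_on with
  | _ n ih =>
    rcases Nat.even_or_odd n with he | ho
    · obtain ⟨m, rfl⟩ := he
      have hm2 : m + m = 2 * m := by omega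
      have hm0 : m ≠ 0 := by omega
      have hq : 2 * m / 2 = m := by omega
      rw [hm2, tz_even (n := 2 * m) (by omega) (Nat.mul_mod_right 2 m), hq, pow_succ,
        mul_comm (2 ^ tz m) 2, xor_two_mul, ih m (by omega) hm0]
      have hp : 0 < 2 ^ tz m := Nat.two_pow_pos _
      omega
    · have h1 : n % 2 = 1 := Nat.odd_iff.mp ho
      rw [tz_odd h1, pow_zero, xor_one_odd h1]

theorem bitsIdx_step {n : Nat} (h0 : n ≠ 0) :
    bitsIdx n = tz n :: bitsIdx (n - 2 ^ tz n) := by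
  induction n using Nat.strong_induction_on with
  | _ n ih =>
    rcases Nat.even_or_odd n with he | ho
    · obtain ⟨m, rfl⟩ := he
      have hm2 : m + m = 2 * m := by omega
      have hm0 : m ≠ 0 := by omega
      have hq : 2 * m / 2 = m := by omega
      rw [hm2, tz_even (n := 2 * m) (by omega) (Nat.mul_mod_right 2 m), hq,
        bitsIdx_two_mul, ih m (by omega) hm0]
      have hsub : 2 * m - 2 ^ (tz m + 1) = 2 * (m - 2 ^ tz m) := by
        rw [pow_succ]; omega
      rw [hsub, bitsIdx_two_mul]
      simp
    · have h1 : n % 2 = 1 := Nat.odd_iff.mp ho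
      rw [tz_odd h1, bitsIdx_pos h0, pow_zero]
      have he2 : (n - 1) % 2 = 0 := by clear ih; omega
      have hsub : (n - 1) / 2 = n / 2 := by omega
      rcases eq_or_ne (n - 1) 0 with hz | hz
      · have hn1 : n = 1 := by omega
        subst hn1
        simp [bitsIdx]
      · rw [bitsIdx_pos hz]
        simp [h1, he2, hsub]

-- ----- A side -----

theorem lsb_int {n : Nat} (h0 : n ≠ 0) :
    Int.land ((n : Int)) (-((n : Int))) = ((2 ^ tz n : Nat) : Int) := by
  obtain ⟨m, rfl⟩ : ∃ m, n = m + 1 := ⟨n - 1, by omega⟩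
  show Int.ofNat (Nat.ldiff (m+1) m) = _
  have h := ldiff_pred (n := m + 1) (by omega)
  simp only [Nat.add_sub_cancel] at h
  rw [h]
  rfl

theorem xor_int {n k : Nat} :
    Int.xor ((n : Int)) ((k : Nat) : Int) = ((n ^^^ k : Nat) : Int) := rfl

theorem pyBitLength_pow (k : Nat) : pyBitLength (((2 ^ k : Nat) : Int)) = (k : Int) + 1 := by
  unfold pyBitLength
  have h : (((2 ^ k : Nat) : Int)) ≠ 0 := by
    simp only [ne_eq, Int.natCast_eq_zero]
    positivity
  rw [if_neg h]
  have h2 : (((2 ^ k : Nat) : Int)).natAbs = 2 ^ k := rfl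
  rw [h2, Nat.log2_two_pow]

theorem goA_eq (n : Nat) : ∀ (fuel : Nat), n ≤ fuel → ∀ (uniques vals : List Int),
    goA fuel ((n : Int)) uniques vals =
      vals ++ (bitsIdx n).map (fun (k : Nat) => (PySem.List.pyGet? uniques (k : Int)).getD 0) := by
  induction n using Nat.strong_induction_on with
  | _ n ih =>
    intro fuel hfuel uniques vals
    rcases eq_or_ne n 0 with rfl | h0
    · cases fuel <;> simp [goA, bitsIdx]
    · obtain ⟨f, rfl⟩ : ∃ f, fuel = f + 1 := ⟨fuel - 1, by omega⟩
      rw [goA]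
      have hne : ((n : Int)) ≠ 0 := by
        simp [h0]
      rw [if_neg hne]
      simp only
      rw [lsb_int h0, xor_int, xor_tz h0, pyBitLength_pow]
      have hbit : ((tz n : Int) + 1 - 1) = (tz n : Int) := by ring
      rw [hbit]
      have hlt : n - 2 ^ tz n < n := by
        have hp : 0 < 2 ^ tz n := Nat.two_pow_pos _
        omega
      rw [ih (n - 2 ^ tz n) hlt f (by omega)]
      rw [bitsIdx_step h0]
      simp

-- ----- B side -----

theorem foldl_append_if' (p : Nat → Prop) [DecidablePred p] (f : Nat → Int)
    (l : List Nat) (acc : List Int) :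
    l.foldl (fun acc x => if p x then acc ++ [f x] else acc) acc
      = acc ++ (l.filter (fun x => decide (p x))).map f := by
  induction l generalizing acc with
  | nil => simp
  | cons x l ih =>
      by_cases h : p x <;> simp [ih, h]

theorem cond_testBit (n i : Nat) :
    decide (Int.land ((n : Int) >>> (i : Int)) 1 ≠ 0) = n.testBit i := by
  have h1 : ((n : Int)) >>> (i : Int) = ((n >>> i : Nat) : Int) := by
    rw [Int.shiftRight_natCast]
  have h2 : Int.land (((n >>> i : Nat) : Int)) 1 = (((n >>> i) % 2 : Nat) : Int) := by
    show Int.ofNat ((n >>> i) &&& 1) = _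
    rw [Nat.and_one_is_mod]
    rfl
  rw [h1, h2, Nat.testBit, Nat.one_and_eq_mod_two]
  rcases Nat.mod_two_eq_zero_or_one (n >>> i) with h | h <;> simp [h]

theorem filter_range_bl (n : Nat) :
    (List.range (blN n)).filter (fun i => n.testBit i) = bitsIdx n := by
  induction n using Nat.strong_induction_on with
  | _ n ih =>
    rcases eq_or_ne n 0 with rfl | h0
    · simp [blN, bitsIdx]
    · rw [blN_pos h0, List.range_succ_eq_map, List.filter_cons, List.filter_map]
      have hcomp : ((fun i => n.testBit i) ∘ Nat.succ) = fun i => (n / 2).testBit i := by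
        funext i
        simp [Function.comp, Nat.testBit_succ]
      rw [hcomp, ih (n / 2) (by omega)]
      rw [bitsIdx_pos h0]
      have ht0 : n.testBit 0 = decide (n % 2 = 1) := Nat.testBit_zero n
      rcases Nat.mod_two_eq_zero_or_one n with h | h <;>
        simp [ht0, h]

theorem alt_eq (n : Nat) (uniques : List Int) :
    mask_to_values_py_alt ((n : Int)) uniques =
      (bitsIdx n).map (fun (k : Nat) => (PySem.List.pyGet? uniques (k : Int)).getD 0) := by
  unfold mask_to_values_py_alt
  have hbl : (pyBitLength ((n : Int))).toNat = blN n := by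
    unfold pyBitLength blN
    rcases eq_or_ne n 0 with rfl | h0
    · rfl
    · have hne : ((n : Int)) ≠ 0 := by simp [h0]
      rw [if_neg hne, if_neg h0]
      have ha : ((n : Int)).natAbs = n := rfl
      rw [ha]
      omega
  rw [hbl]
  rw [foldl_append_if' (fun (i : Nat) => Int.land ((n : Int) >>> (i : Int)) 1 ≠ 0)
        (fun (i : Nat) => (PySem.List.pyGet? uniques (i : Int)).getD 0)]
  have hpred : ((List.range (blN n)).filter
      (fun (x : Nat) => decide (Int.land ((n : Int) >>> (x : Int)) 1 ≠ 0)))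
      = (List.range (blN n)).filter (fun i => n.testBit i) := by
    apply List.filter_congr
    intro x _
    exact cond_testBit n x
  rw [hpred, filter_range_bl]
  simp

-- ===== VERDICT (by name: the statement is the Claim_ definition above) =====
theorem mask_to_values_py_spec : Claim_equal_mask_to_values_py := by
  intro mask uniques hdom hpre
  unfold Spec_mask_to_values_py
  obtain ⟨n, rfl⟩ := Int.eq_ofNat_of_zero_le hpre.1
  unfold mask_to_values_py
  have hfuel : ((n : Int)).toNat + 1 = n + 1 := by simp
  rw [hfuel, goA_eq n (n + 1) (by omega), alt_eq]
  simp
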